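-- pv_equiv track=rewrite | github.com/kwshi/pyjff | pyjff/grammar.py | _inline_nullable
-- ===== SOURCE A (Python) =====
-- def _inline_nullable(string, symbol):
--     if symbol not in string:
--         yield string
--         return
--
--     index = string.index(symbol)
--     for rest in _inline_nullable(string[index + 1:], symbol):
--         yield string[:index] + rest
--         yield string[: index + 1] + rest
-- ===== SOURCE B (Python) =====
-- def _inline_nullable(string, symbol):
--     # One scan collects the segments between successive first-match occurrences
--     # (consuming one character per occurrence, exactly as deletion does); then a
--     # bitmask loop over all 2**k keep/delete choices assembles each output, with
--     # occurrence i driven by bit i so the first occurrence varies fastest.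
--     segments = []
--     rest = string
--     while symbol in rest:
--         i = rest.index(symbol)
--         segments.append(rest[:i])
--         rest = rest[i + 1:]
--     segments.append(rest)
--     c = symbol[:1]
--     k = len(segments) - 1
--     for m in range(2 ** k):
--         yield _assemble(c, segments, m)
--
--
-- def _assemble(c, segments, m):
--     if len(segments) == 1:
--         return segments[0]
--     return segments[0] + (c if m % 2 else '') + _assemble(c, segments[1:], m // 2)
-- ===== Notes on version B (the rewrite author's own statement) =====
-- stated objective: alternative
-- what changed: A's recursion on the first occurrence with interleaved delete/keep yields is replaced by one scan collecting the segments between occurrences followed by a bitmask loop over the 2^k keep/delete choices that assembles each output (bit i of the mask drives occurrence i, so the first occurrence varies fastest, matching A's order); Pre_ excludes only symbol == "", on which A never returns (RecursionError).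
import Mathlib
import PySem

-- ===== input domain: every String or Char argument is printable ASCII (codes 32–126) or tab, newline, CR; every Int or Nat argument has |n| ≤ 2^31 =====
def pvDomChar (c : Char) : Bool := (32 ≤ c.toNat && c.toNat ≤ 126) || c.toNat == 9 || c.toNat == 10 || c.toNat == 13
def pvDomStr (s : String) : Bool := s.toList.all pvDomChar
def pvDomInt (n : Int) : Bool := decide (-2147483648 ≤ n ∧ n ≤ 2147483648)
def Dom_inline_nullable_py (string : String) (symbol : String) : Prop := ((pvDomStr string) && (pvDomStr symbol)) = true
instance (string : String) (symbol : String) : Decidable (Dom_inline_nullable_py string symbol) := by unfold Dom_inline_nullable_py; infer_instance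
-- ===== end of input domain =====

-- B replaces A's recursion with interleaved yields by one segment-collecting scan
-- plus a bitmask loop assembling each of the 2^k outputs (alternative decomposition,
-- same cost); fuel in the ports is only a totality guard (never exhausted when
-- symbol ≠ "", the precondition).

-- ===== PORT A =====
-- A on List Char; fuel = |string|+1 suffices since each recursive call drops ≥ 1 char.
def recA : Nat → List Char → List Char → List (List Char)
  | 0, _, _ => []
  | fuel+1, s, sym =>
    if PySem.Chars.isIn sym s = false then [s]
    else
      let index := (PySem.Chars.find s sym).toNat
      (recA fuel (s.drop (index + 1)) sym).flatMap
        (fun rest => [s.take index ++ rest, s.take (index + 1) ++ rest])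

def inline_nullable_py (string : String) (symbol : String) : List String :=
  (recA (string.toList.length + 1) string.toList symbol.toList).map String.ofList

-- ===== PORT B =====
-- the while loop of Source B: segments between successive first occurrences (fuel guard as above)
def segsB : Nat → List Char → List Char → List (List Char)
  | 0, rest, _ => [rest]
  | fuel+1, rest, sym =>
    if PySem.Chars.isIn sym rest then
      let i := (PySem.Chars.find rest sym).toNat
      rest.take i :: segsB fuel (rest.drop (i + 1)) sym
    else [rest]

-- _assemble of Source B
def asmB (c : List Char) (segs : List (List Char)) (m : Nat) : List Char :=
  match segs with
  | [] => []
  | [s] => s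
  | s :: t :: rest => s ++ (if m % 2 = 1 then c else []) ++ asmB c (t :: rest) (m / 2)

def inline_nullable_py_alt (string : String) (symbol : String) : List String :=
  let segs := segsB (string.toList.length + 1) string.toList symbol.toList
  let c := symbol.toList.take 1
  let k := segs.length - 1
  (List.range (2 ^ k)).map (fun m => String.ofList (asmB c segs m))

-- ===== PRECONDITION & SPEC =====
-- Pre_ excludes only symbol = "", on which Python A never returns (RecursionError).
def Pre_inline_nullable_py (string : String) (symbol : String) : Prop := symbol ≠ ""
instance (string : String) (symbol : String) : Decidable (Pre_inline_nullable_py string symbol) := by unfold Pre_inline_nullable_py; infer_instance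
def pvWitness_inline_nullable_py : String × String := ("abcab", "b")

def Spec_inline_nullable_py (string : String) (symbol : String) (out : List String) : Prop := out = inline_nullable_py_alt string symbol
instance (string : String) (symbol : String) (out : List String) : Decidable (Spec_inline_nullable_py string symbol out) := by unfold Spec_inline_nullable_py; infer_instance

-- ===== CLAIM (what is proved, stated in full; the proofs are below) =====
def Claim_equal_inline_nullable_py : Prop := ∀ (string : String) (symbol : String), Dom_inline_nullable_py string symbol → Pre_inline_nullable_py string symbol → Spec_inline_nullable_py string symbol (inline_nullable_py string symbol)

-- ===== LEMMAS AND PROOFS =====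

lemma segsB_ne_nil (fuel : Nat) (s sym : List Char) : segsB fuel s sym ≠ [] := by
  cases fuel with
  | zero => simp [segsB]
  | succ f => unfold segsB; split <;> simp

-- range over 2*n, pairing consecutive indices
lemma range_two_mul_map {α : Type} (n : Nat) (f : Nat → α) :
    (List.range (2 * n)).map f = (List.range n).flatMap (fun j => [f (2 * j), f (2 * j + 1)]) := by
  induction n with
  | zero => simp
  | succ n ih =>
    have h : 2 * (n + 1) = (2 * n + 1) + 1 := by omega
    rw [h, List.range_succ, List.range_succ, List.range_succ]
    simp [ih, List.flatMap_append]

lemma asmB_cons_cons (c a t : List Char) (r : List (List Char)) (m : Nat) :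
    asmB c (a :: t :: r) m = a ++ (if m % 2 = 1 then c else []) ++ asmB c (t :: r) (m / 2) := rfl

-- the kept character: string[:i+1] = string[:i] ++ symbol[:1] at the first occurrence
lemma take_succ_find (s sym : List Char) (hsym : sym ≠ [])
    (h : PySem.Chars.isIn sym s = true) :
    s.take ((PySem.Chars.find s sym).toNat + 1)
      = s.take (PySem.Chars.find s sym).toNat ++ sym.take 1 := by
  have hinf : sym <:+: s := (PySem.Chars.isIn_iff_infix sym s).mp h
  have hnn : 0 ≤ PySem.Chars.find s sym := (PySem.Chars.find_nonneg_iff s sym).mpr hinf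
  obtain ⟨hpre, -⟩ := PySem.Chars.find_spec (s := s) (sub := sym) hnn
  set i := (PySem.Chars.find s sym).toNat with hi
  obtain ⟨a, sym', rfl⟩ := List.exists_cons_of_ne_nil hsym
  obtain ⟨t, ht⟩ := hpre
  have hget : s[i]? = some a := by
    have : (s.drop i)[0]? = some a := by rw [← ht]; simp
    simpa using this
  rw [List.take_add_one, hget]
  simp

lemma recA_eq (sym : List Char) (hsym : sym ≠ []) :
    ∀ (fuel : Nat) (s : List Char), s.length < fuel →
      recA fuel s sym
        = (List.range (2 ^ ((segsB fuel s sym).length - 1))).map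
            (fun m => asmB (sym.take 1) (segsB fuel s sym) m) := by
  intro fuel
  induction fuel with
  | zero => intro s hs; omega
  | succ f ih =>
    intro s hs
    by_cases hin : PySem.Chars.isIn sym s = true
    · -- symbol occurs: unfold one step on both sides
      have hinf : sym <:+: s := (PySem.Chars.isIn_iff_infix sym s).mp hin
      have hnn : 0 ≤ PySem.Chars.find s sym := (PySem.Chars.find_nonneg_iff s sym).mpr hinf
      obtain ⟨hpre, -⟩ := PySem.Chars.find_spec (s := s) (sub := sym) hnn
      set i := (PySem.Chars.find s sym).toNat with hi
      have hdropne : s.drop i ≠ [] := by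
        intro hd
        obtain ⟨t, ht⟩ := hpre
        rw [hd] at ht
        exact hsym (by cases sym with | nil => rfl | cons a l => simp at ht)
      have hilt : i < s.length := by
        by_contra hle
        exact hdropne (List.drop_eq_nil_of_le (by omega))
      have hlen' : (s.drop (i + 1)).length < f := by
        simp only [List.length_drop]; omega
      have hA : recA (f + 1) s sym
          = (recA f (s.drop (i + 1)) sym).flatMap
              (fun rest => [s.take i ++ rest, s.take (i + 1) ++ rest]) := by
        rw [recA.eq_def]; simp [hin]; rw [← hi]
      have hS : segsB (f + 1) s sym = s.take i :: segsB f (s.drop (i + 1)) sym := by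
        rw [segsB.eq_def]; simp [hin]; rw [← hi]; exact ⟨rfl, rfl⟩
      have ihv := ih (s.drop (i + 1)) hlen'
      obtain ⟨t, r, hseg⟩ := List.exists_cons_of_ne_nil (segsB_ne_nil f (s.drop (i + 1)) sym)
      rw [hA, ihv, hS, hseg]
      have hklen : (s.take i :: t :: r).length - 1 = ((t :: r).length - 1) + 1 := by
        simp
      rw [hklen, pow_succ, Nat.mul_comm, range_two_mul_map, List.flatMap_map]
      congr 1
      funext j
      have h1 : (2 * j) % 2 = 0 := by omega
      have h2 : (2 * j) / 2 = j := by omega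
      have h3 : (2 * j + 1) % 2 = 1 := by omega
      have h4 : (2 * j + 1) / 2 = j := by omega
      have htk := take_succ_find s sym hsym hin
      rw [← hi] at htk
      simp [asmB_cons_cons, h1, h2, h3, h4, htk]
    · have hA : recA (f + 1) s sym = [s] := by
        rw [recA.eq_def]; simp [eq_false_of_ne_true hin]
      have hS : segsB (f + 1) s sym = [s] := by
        rw [segsB.eq_def]; simp [eq_false_of_ne_true hin]
      rw [hA, hS]
      simp [asmB]

-- ===== VERDICT (by name: the statement is the Claim_ definition above) =====
theorem inline_nullable_py_spec : Claim_equal_inline_nullable_py := by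
  intro s sym _ hpre
  unfold Spec_inline_nullable_py inline_nullable_py inline_nullable_py_alt
  have hsym : sym.toList ≠ [] := by
    intro h
    exact hpre (by cases sym; simp_all)
  rw [recA_eq sym.toList hsym (s.toList.length + 1) s.toList (by omega)]
  simp [List.map_map, Function.comp]
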